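-- pv_equiv track=rewrite | github.com/miztiik/yen-go | tools/puzzle-enrichment-lab/expert_review.py | render_ascii_board
-- ===== SOURCE A (Python) =====
-- def render_ascii_board(
--     size: int,
--     black: list[tuple[int, int]],
--     white: list[tuple[int, int]],
--     first_move: tuple[str, tuple[int, int]] | None = None,
-- ) -> str:
--     """Render a Go board as ASCII art with coordinates."""
--     board = [["." for _ in range(size)] for _ in range(size)]
--     for x, y in black:
--         if 0 <= x < size and 0 <= y < size:
--             board[y][x] = "X"
--     for x, y in white:
--         if 0 <= x < size and 0 <= y < size:
--             board[y][x] = "O"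
--     if first_move and first_move[1]:
--         _color, (fx, fy) = first_move
--         if 0 <= fx < size and 0 <= fy < size and board[fy][fx] == ".":
--             board[fy][fx] = "*"
--
--     lines: list[str] = []
--     col_labels = "ABCDEFGHJKLMNOPQRST"[:size]
--     lines.append("   " + " ".join(col_labels))
--     for y in range(size):
--         row_num = size - y
--         row_str = f"{row_num:2d} " + " ".join(board[y]) + f" {row_num}"
--         lines.append(row_str)
--     lines.append("   " + " ".join(col_labels))
--     return "\n".join(lines)
-- ===== SOURCE B (Python) =====
-- def render_ascii_board(
--     size: int,
--     black: list[tuple[int, int]],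
--     white: list[tuple[int, int]],
--     first_move: tuple[str, tuple[int, int]] | None = None,
-- ) -> str:
--     """Render a Go board as ASCII art: no mutable grid, cells computed from sets,
--     and rows without any mark reuse one precomputed empty-row string."""
--     black_set = set(black)
--     white_set = set(white)
--     fm = first_move[1] if first_move else None
--     marked_rows = {y for (x, y) in black_set | white_set if 0 <= x < size}
--     if fm is not None and 0 <= fm[0] < size:
--         marked_rows.add(fm[1])
--
--     labels = "   " + " ".join("ABCDEFGHJKLMNOPQRST"[:size])
--     empty_row = " ".join("." * size)
--     lines = [labels]
--     for y in range(size):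
--         n = size - y
--         if y in marked_rows:
--             row = " ".join(
--                 "O" if (x, y) in white_set else
--                 "X" if (x, y) in black_set else
--                 "*" if fm == (x, y) else "."
--                 for x in range(size))
--         else:
--             row = empty_row
--         lines.append(f"{n:2d} {row} {n}")
--     lines.append(labels)
--     return "\n".join(lines)
-- ===== Notes on version B (the rewrite author's own statement) =====
-- stated objective: faster
-- what changed: B drops A's mutable 2D grid and its three placement passes: it builds black/white sets and a set of rows that contain any mark, computes marked rows cell-by-cell from the sets ('O' over 'X' over '*' over '.'), and reuses one precomputed empty-row string for every unmarked row.
import Mathlib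
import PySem

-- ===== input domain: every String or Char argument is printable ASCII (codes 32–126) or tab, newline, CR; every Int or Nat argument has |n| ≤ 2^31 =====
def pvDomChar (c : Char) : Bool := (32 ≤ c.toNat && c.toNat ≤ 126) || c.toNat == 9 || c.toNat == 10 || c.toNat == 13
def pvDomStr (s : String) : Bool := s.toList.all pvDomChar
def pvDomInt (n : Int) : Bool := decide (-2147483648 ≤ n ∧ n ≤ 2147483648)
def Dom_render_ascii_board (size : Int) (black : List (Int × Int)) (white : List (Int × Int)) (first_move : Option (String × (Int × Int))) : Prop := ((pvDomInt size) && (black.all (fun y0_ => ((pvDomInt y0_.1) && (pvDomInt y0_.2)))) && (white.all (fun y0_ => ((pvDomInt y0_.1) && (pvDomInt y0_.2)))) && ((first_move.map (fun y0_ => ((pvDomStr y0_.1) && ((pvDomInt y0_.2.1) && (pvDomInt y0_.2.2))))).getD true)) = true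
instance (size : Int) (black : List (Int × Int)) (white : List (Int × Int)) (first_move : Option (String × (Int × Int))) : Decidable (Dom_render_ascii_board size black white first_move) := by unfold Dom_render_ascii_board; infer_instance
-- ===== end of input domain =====

-- B drops A's mutable 2D grid and its three placement passes: cells are computed directly from
-- two sets, and rows without any mark reuse one precomputed empty-row string (objective: faster).

-- ===== PORT A =====
-- f"{n:2d}" : str(n) right-aligned to width 2 with spaces (the f-string both Pythons use)
def pvPad2 (n : Int) : List Char :=
  let cs := PySem.Int.toChars n
  List.replicate (2 - cs.length) ' ' ++ cs

-- board[y][x] = v  (Python list assignment; indices guarded in range by the caller)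
def pvSet2 (b : List (List Char)) (y x : Nat) (v : Char) : List (List Char) :=
  b.set y ((b.getD y []).set x v)

-- one iteration of  'for x, y in stones: if 0 <= x < size and 0 <= y < size: board[y][x] = v'
def pvPlace (size : Int) (v : Char) (b : List (List Char)) : Int × Int → List (List Char)
  | (px, py) =>
    if 0 ≤ px ∧ px < size ∧ 0 ≤ py ∧ py < size then pvSet2 b py.toNat px.toNat v else b

-- the board after the three placement passes of A (cells as 1-char strings = Char)
def pvBoardA (size : Int) (black : List (Int × Int)) (white : List (Int × Int)) (first_move : Option (String × (Int × Int))) : List (List Char) :=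
  let board0 := (PySem.List.pyRange 0 size 1).map (fun _ => (PySem.List.pyRange 0 size 1).map (fun _ => '.'))
  let b1 := black.foldl (pvPlace size 'X') board0
  let b2 := white.foldl (pvPlace size 'O') b1
  match first_move with
  | none => b2
  | some (_, (fx, fy)) =>
      -- Python short-circuits before board[fy][fx]; the getD default ' ' is never compared when out of range
      if 0 ≤ fx ∧ fx < size ∧ 0 ≤ fy ∧ fy < size ∧ (b2.getD fy.toNat []).getD fx.toNat ' ' = '.' then
        pvSet2 b2 fy.toNat fx.toNat '*'
      else b2

def render_ascii_board (size : Int) (black : List (Int × Int)) (white : List (Int × Int)) (first_move : Option (String × (Int × Int))) : String :=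
  let board := pvBoardA size black white first_move
  let header := ' ' :: ' ' :: ' ' ::
    PySem.Chars.join [' '] ((PySem.List.slice "ABCDEFGHJKLMNOPQRST".toList none (some size)).map (fun c => [c]))
  let rows := (PySem.List.pyRange 0 size 1).map (fun y =>
    pvPad2 (size - y) ++ [' '] ++
      PySem.Chars.join [' '] ((board.getD y.toNat []).map (fun c => [c])) ++
      [' '] ++ PySem.Int.toChars (size - y))
  String.ofList (PySem.Chars.join ['\n'] ([header] ++ rows ++ [header]))

-- ===== PORT B =====
-- 'O' over 'X' over '*' over '.', looked up per cell (white wins; '*' only on an empty cell)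
def pvCell (blackS whiteS : PySem.Set (Int × Int)) (fm : Option (Int × Int)) (x y : Int) : Char :=
  if PySem.Set.contains whiteS (x, y) then 'O'
  else if PySem.Set.contains blackS (x, y) then 'X'
  else if fm = some (x, y) then '*'
  else '.'

-- marked_rows = {y for (x, y) in black_set | white_set if 0 <= x < size}, plus fm's row
def pvMarked (size : Int) (black : List (Int × Int)) (white : List (Int × Int)) (first_move : Option (String × (Int × Int))) : PySem.Set Int :=
  let base := PySem.Set.ofList
    (((PySem.Set.union (PySem.Set.ofList black) (PySem.Set.ofList white)).filter
        (fun p => decide (0 ≤ p.1 ∧ p.1 < size))).map (·.2))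
  match first_move with
  | none => base
  | some (_, (fx, fy)) => if 0 ≤ fx ∧ fx < size then PySem.Set.add base fy else base

def render_ascii_board_alt (size : Int) (black : List (Int × Int)) (white : List (Int × Int)) (first_move : Option (String × (Int × Int))) : String :=
  let blackS := PySem.Set.ofList black
  let whiteS := PySem.Set.ofList white
  let fm := first_move.map (·.2)
  let marked := pvMarked size black white first_move
  let labels := ' ' :: ' ' :: ' ' ::
    PySem.Chars.join [' '] ((PySem.List.slice "ABCDEFGHJKLMNOPQRST".toList none (some size)).map (fun c => [c]))
  -- " ".join("." * size)
  let empty_row := PySem.Chars.join [' '] ((List.replicate size.toNat '.').map (fun c => [c]))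
  let body := (PySem.List.pyRange 0 size 1).map (fun y =>
    pvPad2 (size - y) ++ [' '] ++
      (if PySem.Set.contains marked y then
        PySem.Chars.join [' '] ((PySem.List.pyRange 0 size 1).map (fun x => [pvCell blackS whiteS fm x y]))
      else empty_row) ++
      [' '] ++ PySem.Int.toChars (size - y))
  String.ofList (PySem.Chars.join ['\n'] ([labels] ++ body ++ [labels]))

-- ===== PRECONDITION & SPEC =====
def Spec_render_ascii_board (size : Int) (black : List (Int × Int)) (white : List (Int × Int)) (first_move : Option (String × (Int × Int))) (out : String) : Prop := out = render_ascii_board_alt size black white first_move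
instance (size : Int) (black : List (Int × Int)) (white : List (Int × Int)) (first_move : Option (String × (Int × Int))) (out : String) : Decidable (Spec_render_ascii_board size black white first_move out) := by unfold Spec_render_ascii_board; infer_instance

-- ===== CLAIM (what is proved, stated in full; the proofs are below) =====
def Claim_equal_render_ascii_board : Prop := ∀ (size : Int) (black : List (Int × Int)) (white : List (Int × Int)) (first_move : Option (String × (Int × Int))), Dom_render_ascii_board size black white first_move → Spec_render_ascii_board size black white first_move (render_ascii_board size black white first_move)

-- ===== LEMMAS AND PROOFS =====

-- reading cell (x, y) of the board (default never reached on in-range reads)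
def pvRead (b : List (List Char)) (y x : Nat) : Char := (b.getD y []).getD x ' '

-- the board is an n × n grid
def pvGood (b : List (List Char)) (n : Nat) : Prop := b.length = n ∧ ∀ r ∈ b, r.length = n

theorem pvGood_set2 {b : List (List Char)} {n : Nat} (h : pvGood b n) (y x : Nat) (v : Char) :
    pvGood (pvSet2 b y x v) n := by
  obtain ⟨hl, hr⟩ := h
  by_cases hy : y < b.length
  · refine ⟨by simp [pvSet2, hl], ?_⟩
    intro r hrm
    rcases List.mem_or_eq_of_mem_set hrm with h1 | h1
    · exact hr r h1
    · subst h1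
      rw [List.length_set, List.getD_eq_getElem _ _ hy]
      exact hr _ (List.getElem_mem hy)
  · unfold pvSet2
    rw [List.set_eq_of_length_le (by omega)]
    exact ⟨hl, hr⟩

theorem pvRead_set2 {b : List (List Char)} {n : Nat} (h : pvGood b n) {y x : Nat}
    (hy : y < n) (hx : x < n) (v : Char) (y' x' : Nat) (hy' : y' < n) (hx' : x' < n) :
    pvRead (pvSet2 b y x v) y' x' = if y' = y ∧ x' = x then v else pvRead b y' x' := by
  obtain ⟨hl, hr⟩ := h
  have hyb : y < b.length := by omega
  have hy'b : y' < b.length := by omega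
  have hrow : (b.getD y []).length = n := by
    rw [List.getD_eq_getElem _ _ hyb]; exact hr _ (List.getElem_mem hyb)
  have hrow' : (b.getD y' []).length = n := by
    rw [List.getD_eq_getElem _ _ hy'b]; exact hr _ (List.getElem_mem hy'b)
  unfold pvRead pvSet2
  by_cases hyy : y' = y
  · subst hyy
    have e1 : (b.set y' ((b.getD y' []).set x v)).getD y' [] = (b.getD y' []).set x v := by
      rw [List.getD_eq_getElem (b.set y' ((b.getD y' []).set x v)) [] (n := y')
            (by rw [List.length_set]; exact hy'b)]
      exact List.getElem_set_self _
    rw [e1]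
    by_cases hxx : x' = x
    · subst hxx
      rw [if_pos ⟨rfl, rfl⟩,
          List.getD_eq_getElem ((b.getD y' []).set x' v) ' ' (n := x')
            (by rw [List.length_set]; omega)]
      exact List.getElem_set_self _
    · rw [if_neg (by tauto),
          List.getD_eq_getElem ((b.getD y' []).set x v) ' ' (n := x')
            (by rw [List.length_set]; omega),
          List.getElem_set_ne (by omega),
          List.getD_eq_getElem (b.getD y' []) ' ' (n := x') (by omega)]
  · have e1 : (b.set y ((b.getD y []).set x v)).getD y' [] = b.getD y' [] := by
      rw [List.getD_eq_getElem (b.set y ((b.getD y []).set x v)) [] (n := y')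
            (by rw [List.length_set]; exact hy'b),
          List.getElem_set_ne (by omega), List.getD_eq_getElem b [] (n := y') hy'b]
    rw [e1, if_neg (by tauto)]

theorem pvGood_place {size : Int} {b : List (List Char)} (hb : pvGood b size.toNat)
    (v : Char) (p : Int × Int) : pvGood (pvPlace size v b p) size.toNat := by
  obtain ⟨p1, p2⟩ := p
  simp only [pvPlace]
  split
  · exact pvGood_set2 hb _ _ _
  · exact hb

theorem pvGood_foldl_place (size : Int) (v : Char) :
    ∀ (ps : List (Int × Int)) (b : List (List Char)), pvGood b size.toNat →
      pvGood (ps.foldl (pvPlace size v) b) size.toNat := by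
  intro ps
  induction ps with
  | nil => intro b hb; simpa using hb
  | cons p ps ih => intro b hb; rw [List.foldl_cons]; exact ih _ (pvGood_place hb v p)

theorem pvRead_foldl_place (size : Int) (v : Char) :
    ∀ (ps : List (Int × Int)) (b : List (List Char)), pvGood b size.toNat →
      ∀ {x y : Nat}, x < size.toNat → y < size.toNat →
      pvRead (ps.foldl (pvPlace size v) b) y x =
        if ((x : Int), (y : Int)) ∈ ps then v else pvRead b y x := by
  intro ps
  induction ps with
  | nil => intro b hb x y hx hy; simp
  | cons p ps ih =>
    intro b hb x y hx hy
    obtain ⟨p1, p2⟩ := p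
    rw [List.foldl_cons, ih _ (pvGood_place hb v (p1, p2)) hx hy]
    by_cases hm : ((x : Int), (y : Int)) ∈ ps
    · simp [hm]
    · rw [if_neg hm]
      simp only [List.mem_cons, hm, or_false]
      simp only [pvPlace]
      by_cases hg : 0 ≤ p1 ∧ p1 < size ∧ 0 ≤ p2 ∧ p2 < size
      · rw [if_pos hg,
            pvRead_set2 hb (y := p2.toNat) (x := p1.toNat) (by omega) (by omega) v y x hy hx]
        have hiff : (y = p2.toNat ∧ x = p1.toNat) ↔ (((x : Int), (y : Int)) = (p1, p2)) := by
          simp only [Prod.mk.injEq]; omega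
        exact if_congr hiff rfl rfl
      · have hne : ¬(((x : Int), (y : Int)) = (p1, p2)) := by
          simp only [Prod.mk.injEq]; omega
        rw [if_neg hg, if_neg hne]

theorem pvGood_board0 (size : Int) :
    pvGood ((PySem.List.pyRange 0 size 1).map fun _ =>
      (PySem.List.pyRange 0 size 1).map fun _ => '.') size.toNat := by
  constructor
  · simp [PySem.List.length_pyRange_one]
  · intro r hr
    simp only [List.mem_map] at hr
    obtain ⟨a, -, rfl⟩ := hr
    simp [PySem.List.length_pyRange_one]

theorem pvRead_board0 (size : Int) {x y : Nat} (hx : x < size.toNat) (hy : y < size.toNat) :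
    pvRead ((PySem.List.pyRange 0 size 1).map fun _ =>
      (PySem.List.pyRange 0 size 1).map fun _ => '.') y x = '.' := by
  have hlen : ((PySem.List.pyRange 0 size 1).map fun _ =>
      (PySem.List.pyRange 0 size 1).map fun _ => ('.' : Char)).length = size.toNat := by
    simp [PySem.List.length_pyRange_one]
  unfold pvRead
  rw [List.getD_eq_getElem ((PySem.List.pyRange 0 size 1).map fun _ =>
        (PySem.List.pyRange 0 size 1).map fun _ => ('.' : Char)) [] (by rw [hlen]; exact hy),
      List.getElem_map,
      List.getD_eq_getElem ((PySem.List.pyRange 0 size 1).map fun _ => ('.' : Char)) ' '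
        (by simp [PySem.List.length_pyRange_one]; omega),
      List.getElem_map]

theorem pvGood_boardA (size : Int) (black white : List (Int × Int))
    (fm : Option (String × (Int × Int))) :
    pvGood (pvBoardA size black white fm) size.toNat := by
  have hw2 := pvGood_foldl_place size 'O' white _
    (pvGood_foldl_place size 'X' black _ (pvGood_board0 size))
  rcases fm with _ | ⟨s, fx, fy⟩
  · simp only [pvBoardA]; exact hw2
  · simp only [pvBoardA]
    split
    · exact pvGood_set2 hw2 _ _ _
    · exact hw2

theorem pvRead_boardA (size : Int) (black white : List (Int × Int))
    (fm : Option (String × (Int × Int))) {x y : Nat}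
    (hx : x < size.toNat) (hy : y < size.toNat) :
    pvRead (pvBoardA size black white fm) y x
      = pvCell (PySem.Set.ofList black) (PySem.Set.ofList white) (fm.map (·.2)) ↑x ↑y := by
  have hg0 := pvGood_board0 size
  have hw2 : pvGood (white.foldl (pvPlace size 'O') (black.foldl (pvPlace size 'X')
      ((PySem.List.pyRange 0 size 1).map fun _ =>
        (PySem.List.pyRange 0 size 1).map fun _ => '.'))) size.toNat :=
    pvGood_foldl_place size 'O' white _ (pvGood_foldl_place size 'X' black _ hg0)
  have hb2 : ∀ {x y : Nat}, x < size.toNat → y < size.toNat →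
      pvRead (white.foldl (pvPlace size 'O') (black.foldl (pvPlace size 'X')
        ((PySem.List.pyRange 0 size 1).map fun _ =>
          (PySem.List.pyRange 0 size 1).map fun _ => '.'))) y x
      = (if ((x : Int), (y : Int)) ∈ white then 'O'
         else if ((x : Int), (y : Int)) ∈ black then 'X' else '.') := by
    intro x y hx hy
    rw [pvRead_foldl_place size 'O' white _ (pvGood_foldl_place size 'X' black _ hg0) hx hy,
        pvRead_foldl_place size 'X' black _ hg0 hx hy, pvRead_board0 size hx hy]
  rcases fm with _ | ⟨s, fx, fy⟩
  · simp only [pvBoardA]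
    rw [hb2 hx hy]
    simp [pvCell]
  · simp only [pvBoardA]
    split
    next hgc =>
      obtain ⟨h1, h2, h3, h4, h5⟩ := hgc
      rw [pvRead_set2 hw2 (y := fy.toNat) (x := fx.toNat) (by omega) (by omega) '*' y x hy hx]
      by_cases he : y = fy.toNat ∧ x = fx.toNat
      · obtain ⟨hey, hex⟩ := he
        have hread : pvRead (white.foldl (pvPlace size 'O') (black.foldl (pvPlace size 'X')
            ((PySem.List.pyRange 0 size 1).map fun _ =>
              (PySem.List.pyRange 0 size 1).map fun _ => '.'))) y x = '.' := by
          rw [hey, hex]; exact h5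
        have hchar := hb2 hx hy
        rw [hread] at hchar
        have hnw : ¬((x : Int), (y : Int)) ∈ white := by
          intro hmem; rw [if_pos hmem] at hchar; exact absurd hchar (by decide)
        have hnb : ¬((x : Int), (y : Int)) ∈ black := by
          intro hmem; rw [if_neg hnw, if_pos hmem] at hchar; exact absurd hchar (by decide)
        rw [if_pos ⟨hey, hex⟩]
        have hfx : fx = (x : Int) := by omega
        have hfy : fy = (y : Int) := by omega
        simp [pvCell, hnw, hnb, hfx, hfy]
      · rw [if_neg he, hb2 hx hy]
        have hne : ¬(some ((fx, fy) : Int × Int) = some ((x : Int), (y : Int))) := by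
          simp only [Option.some.injEq, Prod.mk.injEq]; omega
        simp [pvCell, hne]
    next hgc =>
      rw [hb2 hx hy]
      by_cases hfm : fx = (x : Int) ∧ fy = (y : Int)
      · have hrd : ¬ pvRead (white.foldl (pvPlace size 'O') (black.foldl (pvPlace size 'X')
            ((PySem.List.pyRange 0 size 1).map fun _ =>
              (PySem.List.pyRange 0 size 1).map fun _ => '.'))) y x = '.' := by
          intro h0
          apply hgc
          refine ⟨by omega, by omega, by omega, by omega, ?_⟩
          have h5 : fy.toNat = y := by omega
          have h6 : fx.toNat = x := by omega
          rw [h5, h6]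
          exact h0
        rw [hb2 hx hy] at hrd
        by_cases hw : ((x : Int), (y : Int)) ∈ white
        · simp [pvCell, hw]
        · by_cases hbk : ((x : Int), (y : Int)) ∈ black
          · simp [pvCell, hw, hbk]
          · exfalso; apply hrd; rw [if_neg hw, if_neg hbk]
      · have hne : ¬(some ((fx, fy) : Int × Int) = some ((x : Int), (y : Int))) := by
          simp only [Option.some.injEq, Prod.mk.injEq]; exact hfm
        simp [pvCell, hne]

-- a cell in a row with no mark renders '.'
theorem pvCell_dot (size : Int) (black white : List (Int × Int))
    (fm : Option (String × (Int × Int))) {x y : Int} (hx0 : 0 ≤ x) (hx1 : x < size)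
    (hmk : ¬ y ∈ pvMarked size black white fm) :
    pvCell (PySem.Set.ofList black) (PySem.Set.ofList white) (fm.map (·.2)) x y = '.' := by
  have hstone : ((x, y) ∈ black ∨ (x, y) ∈ white) → y ∈ pvMarked size black white fm := by
    intro hst
    have hbase : y ∈ PySem.Set.ofList
        (((PySem.Set.union (PySem.Set.ofList black) (PySem.Set.ofList white)).filter
            (fun p => decide (0 ≤ p.1 ∧ p.1 < size))).map (·.2)) := by
      rw [PySem.Set.mem_ofList]
      refine List.mem_map.mpr ⟨(x, y), List.mem_filter.mpr ⟨?_, by simp [hx0, hx1]⟩, rfl⟩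
      rw [PySem.Set.mem_union]
      rcases hst with h | h
      · exact Or.inl ((PySem.Set.mem_ofList _ _).mpr h)
      · exact Or.inr ((PySem.Set.mem_ofList _ _).mpr h)
    rcases fm with _ | ⟨s, fx, fy⟩
    · simpa [pvMarked] using hbase
    · simp only [pvMarked]
      split
      · exact (PySem.Set.mem_add _ _ _).mpr (Or.inl hbase)
      · exact hbase
  have hw : ¬ (PySem.Set.contains (PySem.Set.ofList white) (x, y) = true) := by
    rw [PySem.Set.contains_iff, PySem.Set.mem_ofList]
    intro h; exact hmk (hstone (Or.inr h))
  have hb : ¬ (PySem.Set.contains (PySem.Set.ofList black) (x, y) = true) := by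
    rw [PySem.Set.contains_iff, PySem.Set.mem_ofList]
    intro h; exact hmk (hstone (Or.inl h))
  have hf : ¬ (fm.map (·.2) = some (x, y)) := by
    rcases fm with _ | ⟨s, fx, fy⟩
    · simp
    · intro h
      have h' : ((fx, fy) : Int × Int) = (x, y) := by simpa using h
      rw [Prod.mk.injEq] at h'
      obtain ⟨h1, h2⟩ := h'
      apply hmk
      simp only [pvMarked]
      rw [if_pos ⟨by omega, by omega⟩]
      exact (PySem.Set.mem_add _ _ _).mpr (Or.inr h2.symm)
  unfold pvCell
  rw [if_neg hw, if_neg hb, if_neg hf]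

theorem pvRow_boardA (size : Int) (black white : List (Int × Int))
    (fm : Option (String × (Int × Int))) {y : Int} (hy0 : 0 ≤ y) (hy : y < size) :
    (pvBoardA size black white fm).getD y.toNat []
      = (PySem.List.pyRange 0 size 1).map (fun x =>
          pvCell (PySem.Set.ofList black) (PySem.Set.ofList white) (fm.map (·.2)) x y) := by
  have hgood := pvGood_boardA size black white fm
  have hyN : y.toNat < size.toNat := by omega
  apply List.ext_getElem
  · have hrl : ((pvBoardA size black white fm).getD y.toNat []).length = size.toNat := by
      rw [List.getD_eq_getElem _ _ (by rw [hgood.1]; exact hyN)]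
      exact hgood.2 _ (List.getElem_mem _)
    rw [hrl]; simp [PySem.List.length_pyRange_one]
  · intro i h1 h2
    have hiN : i < size.toNat := by
      have h2' := h2
      simp only [List.length_map, PySem.List.length_pyRange_one] at h2'
      omega
    conv_lhs => rw [← List.getD_eq_getElem ((pvBoardA size black white fm).getD y.toNat []) ' ' h1]
    rw [show ((pvBoardA size black white fm).getD y.toNat []).getD i ' '
          = pvRead (pvBoardA size black white fm) y.toNat i from rfl]
    rw [pvRead_boardA size black white fm hiN hyN]
    rw [List.getElem_map, PySem.List.getElem_pyRange_one, Int.toNat_of_nonneg hy0]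
    simp

-- ===== VERDICT (by name: the statement is the Claim_ definition above) =====
theorem render_ascii_board_spec : Claim_equal_render_ascii_board := by
  intro size black white fm _
  unfold Spec_render_ascii_board
  simp only [render_ascii_board, render_ascii_board_alt]
  refine congrArg String.ofList ?_
  refine congrArg (PySem.Chars.join ['\n']) ?_
  refine congrArg₂ (· ++ ·) ?_ rfl
  refine congrArg₂ (· ++ ·) rfl ?_
  apply List.map_congr_left
  intro y hyM
  rw [PySem.List.mem_pyRange_one] at hyM
  refine congrArg₂ (· ++ ·) ?_ rfl
  refine congrArg₂ (· ++ ·) ?_ rfl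
  refine congrArg₂ (· ++ ·) rfl ?_
  by_cases hmk : y ∈ pvMarked size black white fm
  · rw [if_pos ((PySem.Set.contains_iff _ _).mpr hmk)]
    refine congrArg (PySem.Chars.join [' ']) ?_
    rw [pvRow_boardA size black white fm hyM.1 hyM.2, List.map_map]
    rfl
  · rw [if_neg (by rw [PySem.Set.contains_iff]; exact hmk)]
    refine congrArg (PySem.Chars.join [' ']) ?_
    rw [pvRow_boardA size black white fm hyM.1 hyM.2, List.map_map]
    have hcells : ∀ x ∈ PySem.List.pyRange 0 size 1,
        ((fun c => [c]) ∘ fun x =>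
          pvCell (PySem.Set.ofList black) (PySem.Set.ofList white) (fm.map (·.2)) x y) x
          = (fun _ => (['.'] : List Char)) x := by
      intro x hx
      rw [PySem.List.mem_pyRange_one] at hx
      simp only [Function.comp]
      rw [pvCell_dot size black white fm hx.1 hx.2 hmk]
    rw [List.map_congr_left hcells]
    simp [List.map_replicate, PySem.List.length_pyRange_one, List.map_const']
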